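-- pv_equiv track=rewrite | github.com/yje9802/Algorithms | 프로그래머스/3/389481. 봉인된 주문/봉인된 주문.py | solution
-- ===== SOURCE A (Python) =====
-- def solution(n, bans):
--     answer = ''
--
--     # 문자열 s의 순서 번호 반환
--     def str_to_num(s):
--         num = 0
--         for ch in s:
--             num = num * 26 + (ord(ch) - ord('a') + 1)
--         return num
--
--     # 순서 번호 num을 문자열로 변환
--     def num_to_str(num):
--         result = []
--         while num > 0:
--             num -= 1
--             result.append(chr(ord('a') + (num % 26)))
--             num //= 26
--         return ''.join(reversed(result))
--
--     banned_idx = sorted(str_to_num(b) for b in bans) # bans 원소를 순서 번호로 변환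
--
--     cnt = 0
--     for ban in banned_idx:
--         if ban - cnt <= n:
--             cnt += 1
--         else:
--             break
--
--     answer = num_to_str(n + cnt)
--
--     return answer
-- ===== SOURCE B (Python) =====
-- def solution(n, bans):
--     # alternative: no sort — iterate the count-below map to its least fixed point
--     def str_to_num(s):
--         num = 0
--         for ch in s:
--             num = num * 26 + (ord(ch) - ord('a') + 1)
--         return num
--
--     def num_to_str(num):
--         result = []
--         while num > 0:
--             num -= 1
--             result.append(chr(ord('a') + (num % 26)))
--             num //= 26
--         return ''.join(reversed(result))
--
--     nums = [str_to_num(b) for b in bans]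
--     cnt = 0
--     while True:
--         t = sum(1 for v in nums if v <= n + cnt)
--         if t == cnt:
--             break
--         cnt = t
--     return num_to_str(n + cnt)
-- ===== Notes on version B (the rewrite author's own statement) =====
-- stated objective: alternative
-- what changed: B drops the sort-then-break prefix scan entirely: it keeps the ban indices unsorted and iterates the map cnt -> #{v : v <= n + cnt} to its least fixed point (len(nums) rounds suffice), which equals A's break-scan count over the sorted list.
import Mathlib
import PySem

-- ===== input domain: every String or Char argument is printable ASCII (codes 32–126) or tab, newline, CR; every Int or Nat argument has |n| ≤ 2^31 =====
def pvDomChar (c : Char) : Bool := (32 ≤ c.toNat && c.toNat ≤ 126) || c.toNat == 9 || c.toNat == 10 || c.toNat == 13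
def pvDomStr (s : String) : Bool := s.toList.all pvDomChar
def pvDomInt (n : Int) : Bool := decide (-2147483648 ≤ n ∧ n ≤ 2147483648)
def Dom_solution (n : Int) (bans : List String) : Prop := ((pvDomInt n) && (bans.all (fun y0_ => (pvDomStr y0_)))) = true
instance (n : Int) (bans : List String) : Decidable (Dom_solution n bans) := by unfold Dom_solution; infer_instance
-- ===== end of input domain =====

-- B replaces sort + break-scan by iterating the "how many ban indices are ≤ n + cnt" count to its fixed point (objective: alternative, same result).

-- ===== PORT A =====
-- shared inner helper str_to_num (identical in Source A and Source B)
def pvStrToNum (s : String) : Int :=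
  s.toList.foldl (fun num ch => num * 26 + ((ch.toNat : Int) - 97 + 1)) 0

-- shared inner helper num_to_str (identical in Source A and Source B): the while-loop, building `result`
def pvNumToStrGo (num : Int) (result : List Char) : List Char :=
  if _h : 0 < num then
    pvNumToStrGo (PySem.Int.floordiv (num - 1) 26)
      (result ++ [Char.ofNat (97 + (PySem.Int.mod (num - 1) 26).toNat)])
  else result
termination_by num.toNat
decreasing_by
  have h26 : PySem.Int.floordiv (num - 1) 26 = (num - 1) / 26 :=
    PySem.Int.floordiv_eq_ediv_of_pos (by omega)
  have := Int.ediv_le_self 26 (a := num - 1) (by omega)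
  omega

def pvNumToStr (num : Int) : String := String.mk (pvNumToStrGo num []).reverse

-- A's `for ban in banned_idx: if ban - cnt <= n: cnt += 1 else: break`
def pvCntLoop (n : Int) : List Int → Int → Int
  | [], cnt => cnt
  | ban :: rest, cnt => if ban - cnt ≤ n then pvCntLoop n rest (cnt + 1) else cnt

def solution (n : Int) (bans : List String) : String :=
  let banned_idx := PySem.List.sorted (bans.map (fun b => pvStrToNum b)) (fun x => x) false
  let cnt := pvCntLoop n banned_idx 0
  pvNumToStr (n + cnt)

-- ===== PORT B =====
-- Source B: `sum(1 for v in nums if v <= n + cnt)`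
def pvCountLe (n : Int) (nums : List Int) (cnt : Int) : Int :=
  nums.foldl (fun acc v => if v ≤ n + cnt then acc + 1 else acc) 0

-- Source B's `while True: t = …; if t == cnt: break; cnt = t` — fuel only makes the loop
-- structurally total; nums.length + 1 rounds always suffice (proved in pvIterFix_reaches)
def pvIterFix (n : Int) (nums : List Int) : Nat → Int → Int
  | 0, cnt => cnt
  | fuel + 1, cnt =>
    let t := pvCountLe n nums cnt
    if t = cnt then cnt else pvIterFix n nums fuel t

def solution_alt (n : Int) (bans : List String) : String :=
  let nums := bans.map (fun b => pvStrToNum b)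
  let cnt := pvIterFix n nums (nums.length + 1) 0
  pvNumToStr (n + cnt)

-- ===== PRECONDITION & SPEC =====
def Spec_solution (n : Int) (bans : List String) (out : String) : Prop := out = solution_alt n bans
instance (n : Int) (bans : List String) (out : String) : Decidable (Spec_solution n bans out) := by unfold Spec_solution; infer_instance

-- ===== CLAIM (what is proved, stated in full; the proofs are below) =====
def Claim_equal_solution : Prop := ∀ (n : Int) (bans : List String), Dom_solution n bans → Spec_solution n bans (solution n bans)

-- ===== LEMMAS AND PROOFS =====

-- the loop count never decreases below its start
theorem pvCntLoop_ge (n : Int) : ∀ (l : List Int) (c : Int), c ≤ pvCntLoop n l c := by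
  intro l
  induction l with
  | nil => intro c; simp [pvCntLoop]
  | cons b t ih =>
    intro c
    simp only [pvCntLoop]
    split
    · have := ih (c + 1); omega
    · omega

theorem pvCntLoop_le (n : Int) : ∀ (l : List Int) (c : Int), pvCntLoop n l c ≤ c + l.length := by
  intro l
  induction l with
  | nil => intro c; simp [pvCntLoop]
  | cons b t ih =>
    intro c
    simp only [pvCntLoop, List.length_cons]
    split
    · have := ih (c + 1); push_cast; omega
    · push_cast; omega

-- fixpoint: on a sorted list, the count of values ≤ n + (final cnt) is exactly (final cnt) - (start cnt)
theorem pvCntLoop_fix (n : Int) : ∀ (l : List Int), l.Pairwise (· ≤ ·) → ∀ (c : Int),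
    (l.countP (fun v => decide (v ≤ n + pvCntLoop n l c)) : Int) = pvCntLoop n l c - c := by
  intro l
  induction l with
  | nil => intro _ c; simp [pvCntLoop]
  | cons b t ih =>
    intro hp c
    have hp' := (List.pairwise_cons.mp hp)
    by_cases hb : b - c ≤ n
    · have hK : pvCntLoop n (b :: t) c = pvCntLoop n t (c + 1) := by
        simp [pvCntLoop, hb]
      have hge := pvCntLoop_ge n t (c + 1)
      rw [hK]
      have hbin : b ≤ n + pvCntLoop n t (c + 1) := by omega
      have := ih hp'.2 (c + 1)
      simp only [List.countP_cons, hbin, decide_true, if_true]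
      push_cast
      omega
    · have hK : pvCntLoop n (b :: t) c = c := by simp [pvCntLoop, hb]
      rw [hK]
      have hbnot : decide (b ≤ n + c) = false := decide_eq_false (by omega)
      have ht : t.countP (fun v => decide (v ≤ n + c)) = 0 := by
        rw [List.countP_eq_zero]
        intro v hv
        have := hp'.1 v hv
        simp only [decide_eq_true_eq]
        omega
      simp [ht, hbnot]

-- least: below the final cnt, the count is strictly larger than the argument
theorem pvCntLoop_least (n : Int) : ∀ (l : List Int), l.Pairwise (· ≤ ·) → ∀ (c d : Int),
    c ≤ d → d < pvCntLoop n l c → d < (l.countP (fun v => decide (v ≤ n + d)) : Int) + c := by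
  intro l
  induction l with
  | nil => intro _ c d hcd hlt; simp [pvCntLoop] at hlt; omega
  | cons b t ih =>
    intro hp c d hcd hlt
    have hp' := (List.pairwise_cons.mp hp)
    by_cases hb : b - c ≤ n
    · have hK : pvCntLoop n (b :: t) c = pvCntLoop n t (c + 1) := by
        simp [pvCntLoop, hb]
      rw [hK] at hlt
      have hbin : b ≤ n + d := by omega
      simp only [List.countP_cons, hbin, decide_true, if_true]
      by_cases hcd1 : c + 1 ≤ d
      · have := ih hp'.2 (c + 1) d hcd1 hlt
        push_cast at this ⊢
        omega
      · -- here d = c, and b is counted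
        have hcnt : (0:Int) ≤ (t.countP (fun v => decide (v ≤ n + d)) : Int) := by positivity
        push_cast
        omega
    · have hK : pvCntLoop n (b :: t) c = c := by simp [pvCntLoop, hb]
      rw [hK] at hlt
      omega

-- counting is monotone in the threshold
theorem countLe_mono (n : Int) (l : List Int) (c d : Int) (h : c ≤ d) :
    l.countP (fun v => decide (v ≤ n + c)) ≤ l.countP (fun v => decide (v ≤ n + d)) := by
  apply List.countP_mono_left
  intro v _ hv
  simp only [decide_eq_true_eq] at *
  omega

-- pvCountLe is countP (over the unsorted list = over the sorted list)
theorem pvCountLe_eq (n : Int) (nums : List Int) (c : Int) :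
    pvCountLe n nums c = (nums.countP (fun v => decide (v ≤ n + c)) : Int) := by
  unfold pvCountLe
  rw [PySem.List.foldl_ite_add_one (fun v => v ≤ n + c) nums 0]
  omega

-- B's iteration reaches the value k of A's loop before the fuel runs out
theorem pvIterFix_reaches (n : Int) (nums : List Int) (k : Int)
    (hfix : pvCountLe n nums k = k)
    (hinc : ∀ d, 0 ≤ d → d < k → d < pvCountLe n nums d)
    (hmono : ∀ c d, c ≤ d → pvCountLe n nums c ≤ pvCountLe n nums d) :
    ∀ (fuel : Nat) (c : Int), 0 ≤ c → c ≤ k → k ≤ c + fuel →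
      pvIterFix n nums fuel c = k := by
  intro fuel
  induction fuel with
  | zero => intro c _ h1 h2; simp [pvIterFix]; omega
  | succ m ih =>
    intro c hc0 hck hkm
    simp only [pvIterFix]
    by_cases hstop : pvCountLe n nums c = c
    · simp only [hstop, if_true]
      by_contra hne
      have hlt : c < k := lt_of_le_of_ne hck hne
      have := hinc c hc0 hlt
      omega
    · simp only [hstop, if_false]
      have hlt : c < k := by
        rcases eq_or_lt_of_le hck with h | h
        · exact absurd (h ▸ hfix) hstop
        · exact h
      have h1 : c < pvCountLe n nums c := hinc c hc0 hlt
      have h2 : pvCountLe n nums c ≤ k := by have := hmono c k hck; omega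
      exact ih (pvCountLe n nums c) (by omega) h2 (by push_cast at hkm ⊢; omega)

-- B's fixed-point iteration over the unsorted indices equals A's break-scan over the sorted ones
theorem pv_main (n : Int) (nums : List Int) :
    pvIterFix n nums (nums.length + 1) 0
      = pvCntLoop n (PySem.List.sorted nums (fun x => x) false) 0 := by
  have hperm : (PySem.List.sorted nums (fun x => x) false).Perm nums :=
    PySem.List.sorted_perm nums (fun x => x) false
  have hpw : (PySem.List.sorted nums (fun x => x) false).Pairwise (· ≤ ·) :=
    PySem.List.sorted_pairwise nums (fun x => x)
  generalize hS : PySem.List.sorted nums (fun x => x) false = S at *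
  have hcount : ∀ c : Int,
      pvCountLe n nums c = (S.countP (fun v => decide (v ≤ n + c)) : Int) := by
    intro c
    rw [pvCountLe_eq, hperm.countP_eq]
  have hk0 : 0 ≤ pvCntLoop n S 0 := pvCntLoop_ge n S 0
  have hfix : pvCountLe n nums (pvCntLoop n S 0) = pvCntLoop n S 0 := by
    rw [hcount]
    have := pvCntLoop_fix n S hpw 0
    omega
  have hinc : ∀ d, 0 ≤ d → d < pvCntLoop n S 0 → d < pvCountLe n nums d := by
    intro d hd0 hdk
    rw [hcount]
    have := pvCntLoop_least n S hpw 0 d hd0 (by omega)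
    omega
  have hmono : ∀ c d : Int, c ≤ d → pvCountLe n nums c ≤ pvCountLe n nums d := by
    intro c d hcd
    rw [hcount, hcount]
    exact_mod_cast countLe_mono n S c d hcd
  have hkm : pvCntLoop n S 0 ≤ (nums.length : Int) := by
    have h1 := pvCntLoop_le n S 0
    have h2 : S.length = nums.length := hperm.length_eq
    omega
  exact pvIterFix_reaches n nums (pvCntLoop n S 0)
    hfix hinc hmono (nums.length + 1) 0 le_rfl hk0 (by push_cast; omega)

-- ===== VERDICT (by name: the statement is the Claim_ definition above) =====
theorem solution_spec : Claim_equal_solution := by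
  intro n bans _
  show solution n bans = solution_alt n bans
  show pvNumToStr (n + pvCntLoop n
      (PySem.List.sorted (bans.map (fun b => pvStrToNum b)) (fun x => x) false) 0)
    = pvNumToStr (n + pvIterFix n (bans.map (fun b => pvStrToNum b))
      ((bans.map (fun b => pvStrToNum b)).length + 1) 0)
  rw [pv_main]
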